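-- pv_equiv track=rewrite | github.com/alsdk3586/study-algorithm | 12월/20211219/박다정/p_1.py | dfs
-- ===== SOURCE A (Python) =====
-- def dfs(n, sequence, operations, current):
--     if current > len(sequence)-1:
--         return [sequence]
--
--     result = []
--
--     for i in range(len(operations)):
--         if operations[i] == 0:
--             continue
--
--         new_sequence = sequence[:]
--         new_sequence[current] = i
--         new_operations = operations[:]
--         new_operations[i] -= 1
--
--         result += dfs(n, new_sequence, new_operations, current + 2)
--
--     return result
-- ===== SOURCE B (Python) =====
-- def dfs(n, sequence, operations, current):
--     results = []
--     stack = [(sequence, operations, current)]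
--     while stack:
--         seq, ops, cur = stack.pop()
--         if cur > len(seq) - 1:
--             results.append(seq)
--             continue
--         for i in reversed(range(len(ops))):
--             if ops[i] == 0:
--                 continue
--             child_seq = seq[:]
--             child_seq[cur] = i
--             child_ops = ops[:]
--             child_ops[i] -= 1
--             stack.append((child_seq, child_ops, cur + 2))
--     return results
-- ===== Notes on version B (the rewrite author's own statement) =====
-- stated objective: alternative
-- what changed: A's recursive backtracking (recursive call per branch, concatenating sub-results) is replaced by an iterative explicit-stack worklist: frames (sequence, operations, current) are popped from a LIFO stack, base frames append to a results list, and child frames are pushed in reversed index order so they pop in increasing order, reproducing A's pre-order output exactly.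
import Mathlib
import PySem

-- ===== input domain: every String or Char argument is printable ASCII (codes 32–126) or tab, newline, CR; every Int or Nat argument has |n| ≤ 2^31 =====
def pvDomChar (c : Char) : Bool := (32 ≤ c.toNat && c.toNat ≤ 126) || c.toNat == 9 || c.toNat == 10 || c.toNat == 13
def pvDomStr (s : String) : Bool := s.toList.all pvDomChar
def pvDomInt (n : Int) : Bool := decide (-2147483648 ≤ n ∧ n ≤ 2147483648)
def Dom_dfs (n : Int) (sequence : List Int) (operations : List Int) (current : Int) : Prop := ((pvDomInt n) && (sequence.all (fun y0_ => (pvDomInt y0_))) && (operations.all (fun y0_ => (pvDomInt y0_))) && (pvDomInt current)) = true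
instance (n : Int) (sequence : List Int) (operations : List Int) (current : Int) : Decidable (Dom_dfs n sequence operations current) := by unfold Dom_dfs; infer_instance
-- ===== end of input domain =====

-- B replaces A's recursion by an explicit-stack worklist traversal (same cost); return values agree on all non-raising inputs.

-- ===== PORT A =====
-- new_operations[i] -= 1 with i ∈ range(len(operations)): always in range, List.set is exact here
def decAt (xs : List Int) (i : Nat) : List Int := xs.set i (xs.getD i 0 - 1)

-- port of A's recursion; sequence[current] = i is PySem.List.pySetD (exact where Python returns, i.e. under Pre_dfs)
def dfs (n : Int) (sequence : List Int) (operations : List Int) (current : Int) : List (List Int) :=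
  if _h : current > (sequence.length : Int) - 1 then [sequence]
  else (List.range operations.length).foldl
    (fun result i =>
      if operations.getD i 0 = 0 then result
      else result ++ dfs n (PySem.List.pySetD sequence current (i : Int)) (decAt operations i) (current + 2)) []
termination_by ((sequence.length : Int) - current).toNat
decreasing_by
  simp only [PySem.List.length_pySetD]
  omega

-- ===== PORT B =====
-- child frames of a non-base frame, in increasing i order (Python pushes them reversed, so they pop in this order)
def pvChildren (seq : List Int) (ops : List Int) (cur : Int) : List (List Int × List Int × Int) :=
  (List.range ops.length).filterMap (fun i =>
    if ops.getD i 0 = 0 then none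
    else some (PySem.List.pySetD seq cur (i : Int), decAt ops i, cur + 2))

-- per-frame weight for termination of the worklist loop
def pvWeight (f : List Int × List Int × Int) : Nat :=
  (f.2.1.length + 2) ^ ((f.1.length : Int) - f.2.2).toNat

theorem pvChildren_measure (seq ops : List Int) (cur : Int)
    (h : ¬ cur > (seq.length : Int) - 1) :
    ((pvChildren seq ops cur).map pvWeight).sum < pvWeight (seq, ops, cur) := by
  have hk : 1 ≤ ((seq.length : Int) - cur).toNat := by omega
  set m := ops.length with hm
  set k := ((seq.length : Int) - cur).toNat with hkdef
  have hw : ∀ f ∈ pvChildren seq ops cur, pvWeight f = (m + 2) ^ (k - 2) := by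
    intro f hf
    simp only [pvChildren, List.mem_filterMap, List.mem_range] at hf
    obtain ⟨i, hi, hfi⟩ := hf
    split at hfi
    · exact absurd hfi (by simp)
    · cases hfi.symm
      simp only [pvWeight, PySem.List.length_pySetD, decAt, List.length_set]
      congr 1
      omega
  have hlen : (pvChildren seq ops cur).length ≤ m := by
    calc (pvChildren seq ops cur).length ≤ (List.range ops.length).length :=
          List.length_filterMap_le _ _
      _ = m := by simp [hm]
  have hsum : ((pvChildren seq ops cur).map pvWeight).sum
      = (pvChildren seq ops cur).length * (m + 2) ^ (k - 2) := by
    rw [List.sum_eq_card_nsmul ((pvChildren seq ops cur).map pvWeight) ((m + 2) ^ (k - 2))]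
    · simp
    · intro x hx
      obtain ⟨f, hf, rfl⟩ := List.mem_map.mp hx
      exact hw f hf
  rw [hsum]
  have hwself : pvWeight (seq, ops, cur) = (m + 2) ^ k := by
    simp [pvWeight, hm, hkdef]
  rw [hwself]
  calc (pvChildren seq ops cur).length * (m + 2) ^ (k - 2)
      ≤ m * (m + 2) ^ (k - 2) := Nat.mul_le_mul_right _ hlen
    _ < (m + 2) * (m + 2) ^ (k - 2) := by
        exact (Nat.mul_lt_mul_right (Nat.pow_pos (by omega))).mpr (by omega)
    _ = (m + 2) ^ (k - 2 + 1) := by ring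
    _ ≤ (m + 2) ^ k := Nat.pow_le_pow_right (by omega) (by omega)

-- port of B's while-loop; the stack's head is its top (Python pops from the end)
def pvLoop (n : Int) (stack : List (List Int × List Int × Int)) (results : List (List Int)) :
    List (List Int) :=
  match stack with
  | [] => results
  | (seq, ops, cur) :: rest =>
    if h : cur > (seq.length : Int) - 1 then pvLoop n rest (results ++ [seq])
    else pvLoop n (pvChildren seq ops cur ++ rest) results
termination_by (stack.map pvWeight).sum
decreasing_by
  · simp only [List.map_cons, List.sum_cons]
    have : 0 < pvWeight (seq, ops, cur) := (Nat.pow_pos (by omega))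
    omega
  · simp only [List.map_cons, List.map_append, List.sum_cons, List.sum_append]
    have := pvChildren_measure seq ops cur h
    omega

def dfs_alt (n : Int) (sequence : List Int) (operations : List Int) (current : Int) : List (List Int) :=
  pvLoop n [(sequence, operations, current)] []

-- ===== PRECONDITION & SPEC =====
-- Pre_ excludes exactly the inputs where Python A raises IndexError: current below -len(sequence)
-- (so the write sequence[current]=... is out of range) while some operation count is nonzero.
def Pre_dfs (n : Int) (sequence : List Int) (operations : List Int) (current : Int) : Prop :=
  -(sequence.length : Int) ≤ current ∨ (sequence.length : Int) ≤ current ∨ ∀ x ∈ operations, x = 0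
instance (n : Int) (sequence : List Int) (operations : List Int) (current : Int) : Decidable (Pre_dfs n sequence operations current) := by unfold Pre_dfs; infer_instance

def pvWitness_dfs : Int × List Int × List Int × Int := (4, [0, 0, 0, 0], [2, 1, 1], 0)

def Spec_dfs (n : Int) (sequence : List Int) (operations : List Int) (current : Int) (out : List (List Int)) : Prop := out = dfs_alt n sequence operations current
instance (n : Int) (sequence : List Int) (operations : List Int) (current : Int) (out : List (List Int)) : Decidable (Spec_dfs n sequence operations current out) := by unfold Spec_dfs; infer_instance

-- ===== CLAIM (what is proved, stated in full; the proofs are below) =====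
def Claim_equal_dfs : Prop := ∀ (n : Int) (sequence : List Int) (operations : List Int) (current : Int), Dom_dfs n sequence operations current → Pre_dfs n sequence operations current → Spec_dfs n sequence operations current (dfs n sequence operations current)

-- ===== LEMMAS AND PROOFS =====

-- A's for-loop with 'result += …' equals the flattened map over the filterMap of surviving indices
theorem pvFoldl_filterMap {α β γ : Type} (l : List α) (p : α → Prop) [DecidablePred p]
    (h : α → β) (G : β → List γ) (acc : List γ) :
    l.foldl (fun res i => if p i then res else res ++ G (h i)) acc
      = acc ++ ((l.filterMap (fun i => if p i then none else some (h i))).map G).flatten := by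
  induction l generalizing acc with
  | nil => simp
  | cons x xs ih =>
    by_cases hp : p x
    · simp [hp, ih]
    · simp [hp, ih]

theorem dfs_else (n : Int) (seq ops : List Int) (cur : Int)
    (h : ¬ cur > (seq.length : Int) - 1) :
    dfs n seq ops cur = ((pvChildren seq ops cur).map (fun f => dfs n f.1 f.2.1 f.2.2)).flatten := by
  rw [dfs]
  rw [dif_neg h]
  exact pvFoldl_filterMap (List.range ops.length) (fun i => ops.getD i 0 = 0)
    (fun i => (PySem.List.pySetD seq cur (i : Int), decAt ops i, cur + 2))
    (fun f => dfs n f.1 f.2.1 f.2.2) []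

theorem pvLoop_eq (n : Int) (stack : List (List Int × List Int × Int)) (acc : List (List Int)) :
    pvLoop n stack acc = acc ++ (stack.map (fun f => dfs n f.1 f.2.1 f.2.2)).flatten := by
  induction stack, acc using pvLoop.induct with
  | case1 acc => simp [pvLoop]
  | case2 acc seq ops cur rest h ih =>
    rw [pvLoop, dif_pos h, ih]
    have : dfs n seq ops cur = [seq] := by rw [dfs, dif_pos h]
    simp [this]
  | case3 acc seq ops cur rest h ih =>
    rw [pvLoop, dif_neg h, ih]
    simp [dfs_else n seq ops cur h]

-- ===== VERDICT (by name: the statement is the Claim_ definition above) =====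
theorem dfs_spec : Claim_equal_dfs := by
  intro n sequence operations current _ _
  unfold Spec_dfs dfs_alt
  rw [pvLoop_eq]
  simp
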